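-- pv_equiv track=rewrite | github.com/eforge-build/benchmarks | harness/run_benchmark.py | filter_benchmark_artifacts
-- ===== SOURCE A (Python) =====
-- def filter_benchmark_artifacts(patch: str) -> str:
--     """Remove diffs for files we added (PRD, eforge.yaml) from the patch."""
--     if not patch:
--         return patch
--
--     filtered_hunks = []
--     current_hunk = []
--     skip = False
--
--     for line in patch.split("\n"):
--         if line.startswith("diff --git"):
--             if current_hunk and not skip:
--                 filtered_hunks.append("\n".join(current_hunk))
--             current_hunk = [line]
--             skip = any(
--                 artifact in line
--                 for artifact in [
--                     "docs/swe-bench-issue.md",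
--                     "docs/prd-queue/",
--                     "eforge.yaml",
--                     ".eforge/",
--                     "plans/",
--                     ".md.lock",
--                 ]
--             )
--         else:
--             current_hunk.append(line)
--
--     if current_hunk and not skip:
--         filtered_hunks.append("\n".join(current_hunk))
--
--     return "\n".join(filtered_hunks)
-- ===== SOURCE B (Python) =====
-- ARTIFACTS = [
--     "docs/swe-bench-issue.md",
--     "docs/prd-queue/",
--     "eforge.yaml",
--     ".eforge/",
--     "plans/",
--     ".md.lock",
-- ]
--
--
-- def _is_artifact_header(line):
--     return line.startswith("diff --git") and any(a in line for a in ARTIFACTS)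
--
--
-- def _split_hunks(lines):
--     """Group lines into hunks: each 'diff --git' line opens a new hunk; any
--     leading pre-diff lines form a headerless first hunk."""
--     hunks = []
--     i = 0
--     n = len(lines)
--     while i < n:
--         j = i + 1
--         while j < n and not lines[j].startswith("diff --git"):
--             j += 1
--         hunks.append(lines[i:j])
--         i = j
--     return hunks
--
--
-- def filter_benchmark_artifacts(patch: str) -> str:
--     """Remove diffs for files we added (PRD, eforge.yaml) from the patch."""
--     if not patch:
--         return patch
--     hunks = _split_hunks(patch.split("\n"))
--     kept = ["\n".join(h) for h in hunks if not _is_artifact_header(h[0])]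
--     return "\n".join(kept)
-- ===== Notes on version B (the rewrite author's own statement) =====
-- stated objective: alternative
-- what changed: A streams the lines through one fold carrying (emitted hunks, current hunk, skip flag); B first groups the lines into hunks (each 'diff --git' line opens one, leading pre-diff lines form a headerless hunk), then filters out hunks whose header names an artifact, then joins the kept hunks.
import Mathlib
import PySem

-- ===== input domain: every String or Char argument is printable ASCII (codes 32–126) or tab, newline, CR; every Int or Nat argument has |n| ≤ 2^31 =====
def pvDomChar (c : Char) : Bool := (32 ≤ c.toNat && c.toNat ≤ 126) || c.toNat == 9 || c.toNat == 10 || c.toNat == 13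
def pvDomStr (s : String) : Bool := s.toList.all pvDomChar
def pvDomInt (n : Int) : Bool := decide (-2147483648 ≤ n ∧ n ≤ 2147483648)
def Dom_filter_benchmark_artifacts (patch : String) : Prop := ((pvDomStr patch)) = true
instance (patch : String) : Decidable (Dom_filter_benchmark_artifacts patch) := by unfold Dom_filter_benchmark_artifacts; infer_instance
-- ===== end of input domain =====

-- B replaces A's single streaming fold (emitted hunks / current hunk / skip flag) by
-- group-into-hunks, filter by header, join: a different decomposition, same cost.

def pvArtifacts : List String :=
  ["docs/swe-bench-issue.md", "docs/prd-queue/", "eforge.yaml", ".eforge/", "plans/", ".md.lock"]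

-- line.startswith("diff --git")
def pvIsDiff (line : String) : Bool := PySem.Str.startswith line "diff --git"

-- any(artifact in line for artifact in [...])
def pvHasArtifact (line : String) : Bool := pvArtifacts.any (fun a => PySem.Str.isIn a line)

-- ===== PORT A =====
-- loop body of A's for-loop (state: filtered_hunks, current_hunk, skip)
def pvStepA (st : List String × List String × Bool) (line : String) :
    List String × List String × Bool :=
  if pvIsDiff line then
    ((if st.2.1 ≠ [] ∧ st.2.2 = false then st.1 ++ [PySem.Str.join "\n" st.2.1] else st.1),
     [line],
     pvHasArtifact line)
  else
    (st.1, st.2.1 ++ [line], st.2.2)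

-- A's trailing 'if current_hunk and not skip' flush
def pvFinishA (st : List String × List String × Bool) : List String :=
  if st.2.1 ≠ [] ∧ st.2.2 = false then st.1 ++ [PySem.Str.join "\n" st.2.1] else st.1

def filter_benchmark_artifacts (patch : String) : String :=
  if patch = "" then patch
  else
    PySem.Str.join "\n"
      (pvFinishA (((PySem.Str.split? patch "\n").getD []).foldl pvStepA ([], [], false)))

-- ===== PORT B =====
def pvIsArtifactHeader (line : String) : Bool := pvIsDiff line && pvHasArtifact line

def pvNotDiff (s : String) : Bool := !pvIsDiff s

-- B's _split_hunks: the outer while-loop as recursion; the inner index scan j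
-- locating the next 'diff --git' boundary is takeWhile/dropWhile (exact)
def pvSplitHunks : List String → List (List String)
  | [] => []
  | l :: rest =>
      (l :: rest.takeWhile pvNotDiff) :: pvSplitHunks (rest.dropWhile pvNotDiff)
termination_by lines => lines.length
decreasing_by
  simpa using Nat.lt_succ_of_le (List.length_dropWhile_le pvNotDiff rest)

def filter_benchmark_artifacts_alt (patch : String) : String :=
  if patch = "" then patch
  else
    PySem.Str.join "\n"
      (((pvSplitHunks ((PySem.Str.split? patch "\n").getD [])).filter
          (fun h => !pvIsArtifactHeader (h.headD ""))).map (PySem.Str.join "\n"))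

-- ===== PRECONDITION & SPEC =====
def Spec_filter_benchmark_artifacts (patch : String) (out : String) : Prop := out = filter_benchmark_artifacts_alt patch
instance (patch : String) (out : String) : Decidable (Spec_filter_benchmark_artifacts patch out) := by unfold Spec_filter_benchmark_artifacts; infer_instance

-- ===== CLAIM (what is proved, stated in full; the proofs are below) =====
def Claim_equal_filter_benchmark_artifacts : Prop := ∀ (patch : String), Dom_filter_benchmark_artifacts patch → Spec_filter_benchmark_artifacts patch (filter_benchmark_artifacts patch)

-- ===== LEMMAS AND PROOFS =====

-- B's kept-hunk strings for a given line list
def pvKept (lines : List String) : List String :=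
  ((pvSplitHunks lines).filter (fun h => !pvIsArtifactHeader (h.headD ""))).map
    (PySem.Str.join "\n")

-- invariant of A's fold: flushing the final state yields the hunks already emitted,
-- then the current hunk extended to the next boundary (if kept), then B's kept hunks
-- of the remaining lines
lemma pvCoreA (lines : List String) : ∀ (fh ch : List String) (sk : Bool),
    pvFinishA (lines.foldl pvStepA (fh, ch, sk))
      = fh ++
        (if ch ++ lines.takeWhile pvNotDiff ≠ [] ∧ sk = false
          then [PySem.Str.join "\n" (ch ++ lines.takeWhile pvNotDiff)] else []) ++
        pvKept (lines.dropWhile pvNotDiff) := by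
  induction lines with
  | nil =>
      intro fh ch sk
      simp only [List.foldl_nil, List.takeWhile_nil, List.dropWhile_nil, List.append_nil,
        pvFinishA, pvKept, pvSplitHunks, List.filter_nil, List.map_nil]
      split_ifs <;> simp
  | cons l rest ih =>
      intro fh ch sk
      cases hl : pvIsDiff l with
      | true =>
          have hnd : pvNotDiff l = false := by simp [pvNotDiff, hl]
          simp only [List.foldl_cons, pvStepA, hl, if_true]
          rw [ih]
          simp only [List.takeWhile_cons, List.dropWhile_cons, hnd, Bool.false_eq_true,
            if_false, pvKept, pvSplitHunks]
          simp only [List.filter_cons]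
          cases hsk2 : pvHasArtifact l <;>
            simp [pvIsArtifactHeader, hl, hsk2] <;> split_ifs <;> simp_all
      | false =>
          have hnd : pvNotDiff l = true := by simp [pvNotDiff, hl]
          simp only [List.foldl_cons, pvStepA, hl, Bool.false_eq_true, if_false]
          rw [ih]
          simp only [List.takeWhile_cons, List.dropWhile_cons, hnd, if_true]
          have h2 : ch ++ l :: rest.takeWhile pvNotDiff
              = (ch ++ [l]) ++ rest.takeWhile pvNotDiff := by simp
          rw [h2]

-- B's kept hunks split off the (always kept) headerless leading hunk
lemma pvKeptSplit (lines : List String) :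
    pvKept lines
      = (if lines.takeWhile pvNotDiff ≠ []
          then [PySem.Str.join "\n" (lines.takeWhile pvNotDiff)] else []) ++
        pvKept (lines.dropWhile pvNotDiff) := by
  cases lines with
  | nil => simp [pvKept, pvSplitHunks]
  | cons l rest =>
      cases hl : pvIsDiff l with
      | true =>
          have hnd : pvNotDiff l = false := by simp [pvNotDiff, hl]
          simp [hnd]
      | false =>
          have hnd : pvNotDiff l = true := by simp [pvNotDiff, hl]
          simp [pvKept, pvSplitHunks, hnd, pvIsArtifactHeader, hl]

-- ===== VERDICT (by name: the statement is the Claim_ definition above) =====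
theorem filter_benchmark_artifacts_spec : Claim_equal_filter_benchmark_artifacts := by
  intro patch _
  unfold Spec_filter_benchmark_artifacts filter_benchmark_artifacts filter_benchmark_artifacts_alt
  by_cases hp : patch = ""
  · simp [hp]
  · simp only [hp, if_false]
    rw [pvCoreA]
    rw [show ((pvSplitHunks ((PySem.Str.split? patch "\n").getD [])).filter
        (fun h => !pvIsArtifactHeader (h.headD ""))).map (PySem.Str.join "\n")
        = pvKept ((PySem.Str.split? patch "\n").getD []) from rfl]
    rw [pvKeptSplit ((PySem.Str.split? patch "\n").getD [])]
    simp
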